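-- pv_equiv track=rewrite | github.com/chrisumartinez/interview_problems | sentiment_scores.py | sentiment_scores
-- ===== SOURCE A (Python) =====
-- def sentiment_scores(sentiments, texts):
--     #output a list of integers:
--     #indicate with totat sentiment scores:
--     emotions_list = []
--
--     #for each text in texts:
--     for text in texts:
--
--         total_score = 0
--         #split the entire string using no delimiter
--         strings = text.split()
--
--         #now for each string, check value within the sentiments lookup table:
--         for string in strings:
--             #strip the puncuation:
--             string = string.replace("!", "").replace("?", "").replace(",","").replace(".","").replace("'","")
--             #check if value exists within the lookup table:
--             if string in sentiments:
--                 # adjust the total score: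
--                 total_score += sentiments[string]
--
--         #once we finish up tallying scores from strings, append the total score of the string:
--         emotions_list.append(total_score)
--
--     return emotions_list
-- ===== SOURCE B (Python) =====
-- def sentiment_scores(sentiments, texts):
--     # B: per text, build a word-frequency table of the cleaned words, then
--     # compute the total as a weighted sum over the distinct words.
--     result = []
--     for text in texts:
--         counts = {}
--         for w in text.split():
--             w = w.replace("!", "").replace("?", "").replace(",", "").replace(".", "").replace("'", "")
--             counts[w] = counts.get(w, 0) + 1
--         result.append(sum(c * sentiments[w] for w, c in counts.items() if w in sentiments))
--     return result
-- ===== Notes on version B (the rewrite author's own statement) =====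
-- stated objective: alternative
-- what changed: B builds a per-text frequency table of the cleaned words and computes the total as a weighted sum count*score over the distinct words, instead of A's per-word running accumulation.
import Mathlib
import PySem

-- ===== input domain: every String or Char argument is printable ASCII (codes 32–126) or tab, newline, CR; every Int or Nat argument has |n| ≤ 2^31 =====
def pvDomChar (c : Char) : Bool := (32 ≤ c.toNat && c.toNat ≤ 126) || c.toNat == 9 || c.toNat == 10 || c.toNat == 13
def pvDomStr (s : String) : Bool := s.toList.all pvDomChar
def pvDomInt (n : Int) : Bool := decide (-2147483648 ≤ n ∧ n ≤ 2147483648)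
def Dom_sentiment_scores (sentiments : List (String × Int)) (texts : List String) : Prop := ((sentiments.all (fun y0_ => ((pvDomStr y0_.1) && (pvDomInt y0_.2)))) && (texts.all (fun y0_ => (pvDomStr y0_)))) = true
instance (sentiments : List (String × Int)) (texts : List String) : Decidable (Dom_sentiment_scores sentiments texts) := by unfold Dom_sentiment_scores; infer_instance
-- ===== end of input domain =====

-- B builds a per-text frequency table of the cleaned words and totals count*score over
-- distinct words, instead of A's per-word running accumulation (objective: alternative).

-- shared helper: the chained punctuation-stripping replaces (identical in A and B)
def pvClean (w : String) : String :=
  PySem.Str.replace (PySem.Str.replace (PySem.Str.replace (PySem.Str.replace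
    (PySem.Str.replace w "!" "") "?" "") "," "") "." "") "'" ""

-- ===== PORT A =====
def sentiment_scores (sentiments : List (String × Int)) (texts : List String) : List Int :=
  texts.foldl (fun emotions_list text =>
    let strings := PySem.Str.split₀ text
    let total_score := strings.foldl (fun total_score string =>
      let string := pvClean string
      match sentiments.find? (fun p => p.1 == string) with
      | some p => total_score + p.2
      | none => total_score) 0
    emotions_list ++ [total_score]) []

-- ===== PORT B =====
def sentiment_scores_alt (sentiments : List (String × Int)) (texts : List String) : List Int :=
  texts.foldl (fun result text =>
    let counts := (PySem.Str.split₀ text).foldl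
      (fun counts w => counts.insert (pvClean w) (counts.getD (pvClean w) 0 + 1))
      (PySem.Dict.empty : PySem.Dict String Int)
    let total := counts.items.foldl (fun t p =>
      if sentiments.any (fun q => q.1 == p.1) then
        t + p.2 * ((sentiments.find? (fun q => q.1 == p.1)).map Prod.snd).getD 0
      else t) 0
    result ++ [total]) []

-- ===== PRECONDITION & SPEC =====
def Spec_sentiment_scores (sentiments : List (String × Int)) (texts : List String) (out : List Int) : Prop := out = sentiment_scores_alt sentiments texts
instance (sentiments : List (String × Int)) (texts : List String) (out : List Int) : Decidable (Spec_sentiment_scores sentiments texts out) := by unfold Spec_sentiment_scores; infer_instance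

-- ===== CLAIM (what is proved, stated in full; the proofs are below) =====
def Claim_equal_sentiment_scores : Prop := ∀ (sentiments : List (String × Int)) (texts : List String), Dom_sentiment_scores sentiments texts → Spec_sentiment_scores sentiments texts (sentiment_scores sentiments texts)

-- ===== LEMMAS AND PROOFS =====

-- the score of one (already cleaned) word
def pvScore (sentiments : List (String × Int)) (k : String) : Int :=
  ((sentiments.find? (fun p => p.1 == k)).map Prod.snd).getD 0

lemma pv_sum_map_add (f g : String → Int) (l : List String) :
    (l.map (fun k => f k + g k)).sum = (l.map f).sum + (l.map g).sum := by
  induction l with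
  | nil => simp
  | cons x l ih => simp [ih]; ring

lemma pv_sum_ite_eq (f : String → Int) (x : String) (l : List String) (h : l.Nodup) :
    (l.map (fun k => if k = x then f k else 0)).sum = if x ∈ l then f x else 0 := by
  induction l with
  | nil => simp
  | cons y l ih =>
    simp only [List.nodup_cons] at h
    rcases h with ⟨hy, hn⟩
    by_cases hyx : y = x
    · subst hyx
      simp [ih hn, hy]
    · simp only [List.map_cons, List.sum_cons, if_neg hyx, ih hn, List.mem_cons]
      have : (x = y) = False := by simp [Ne.symm hyx]
      simp [this]

lemma pv_weighted_sum (f : String → Int) (ws : List String) :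
    ((PySem.Set.ofList ws).map (fun k => (ws.count k : Int) * f k)).sum = (ws.map f).sum := by
  induction ws using List.reverseRecOn with
  | nil => simp [PySem.Set.ofList_nil]
  | append_singleton ws x ih =>
    rw [PySem.Set.ofList_append_singleton]
    have hcnt : ∀ k, ((ws ++ [x]).count k : Int) = (ws.count k : Int) + (if k = x then 1 else 0) := by
      intro k
      rw [List.count_append]
      simp [List.count_singleton, beq_iff_eq]
      split <;> simp_all [eq_comm]
    by_cases hx : x ∈ ws
    · have hadd : PySem.Set.add (PySem.Set.ofList ws) x = PySem.Set.ofList ws := by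
        simp [PySem.Set.add, hx]
      rw [hadd]
      have : ((PySem.Set.ofList ws).map (fun k => ((ws ++ [x]).count k : Int) * f k)).sum
          = ((PySem.Set.ofList ws).map (fun k => (ws.count k : Int) * f k)).sum
            + ((PySem.Set.ofList ws).map (fun k => if k = x then f k else 0)).sum := by
        rw [← pv_sum_map_add]
        apply congrArg
        apply List.map_congr_left
        intro k _
        rw [hcnt k]
        split <;> ring
      rw [this, ih, pv_sum_ite_eq f x _ (PySem.Set.nodup_ofList ws),
        if_pos ((PySem.Set.mem_ofList _ _).2 hx)]
      simp
    · have hadd : PySem.Set.add (PySem.Set.ofList ws) x = PySem.Set.ofList ws ++ [x] := by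
        simp [PySem.Set.add, hx]
      rw [hadd]
      rw [List.map_append, List.sum_append]
      have h1 : ((PySem.Set.ofList ws).map (fun k => ((ws ++ [x]).count k : Int) * f k))
          = ((PySem.Set.ofList ws).map (fun k => (ws.count k : Int) * f k)) := by
        apply List.map_congr_left
        intro k hk
        have : k ≠ x := fun h => hx (h ▸ (PySem.Set.mem_ofList _ _).1 hk)
        rw [hcnt k, if_neg this]; ring
      have h2 : ((ws ++ [x]).count x : Int) = 1 := by
        rw [hcnt x, if_pos rfl]
        simp [List.count_eq_zero_of_not_mem hx]
      simp only [h1, ih, List.map_cons, List.map_nil, List.sum_cons, List.sum_nil, h2]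
      simp

lemma pv_total_eq (sentiments : List (String × Int)) (text : String) :
    ((PySem.Str.split₀ text).foldl (fun total_score string =>
      match sentiments.find? (fun p => p.1 == pvClean string) with
      | some p => total_score + p.2
      | none => total_score) 0 : Int)
    = ((PySem.Str.split₀ text).foldl
        (fun counts w => counts.insert (pvClean w) (counts.getD (pvClean w) 0 + 1))
        (PySem.Dict.empty : PySem.Dict String Int)).items.foldl (fun t p =>
      if sentiments.any (fun q => q.1 == p.1) then
        t + p.2 * ((sentiments.find? (fun q => q.1 == p.1)).map Prod.snd).getD 0
      else t) 0 := by
  have hstepA : (fun (total_score : Int) (string : String) =>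
      match sentiments.find? (fun p => p.1 == pvClean string) with
      | some p => total_score + p.2
      | none => total_score)
      = fun t s => t + pvScore sentiments (pvClean s) := by
    funext t s
    cases h : sentiments.find? (fun p => p.1 == pvClean s) <;> simp [pvScore, h]
  have hcounts : ((PySem.Str.split₀ text).foldl
      (fun counts w => counts.insert (pvClean w) (counts.getD (pvClean w) 0 + 1))
      (PySem.Dict.empty : PySem.Dict String Int))
      = PySem.Dict.counter ((PySem.Str.split₀ text).map pvClean) := by
    rw [← PySem.Dict.foldl_insert_getD_add_one_eq_counter, List.foldl_map]
  have hstepB : (fun (t : Int) (p : String × Int) =>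
      if sentiments.any (fun q => q.1 == p.1) then
        t + p.2 * ((sentiments.find? (fun q => q.1 == p.1)).map Prod.snd).getD 0
      else t)
      = fun t p => t + p.2 * pvScore sentiments p.1 := by
    funext t p
    by_cases h : sentiments.any (fun q => q.1 == p.1)
    · simp [h, pvScore]
    · have hnone : sentiments.find? (fun q => q.1 == p.1) = none := by
        rw [List.find?_eq_none]
        intro q hq
        simp only [List.any_eq_true, not_exists, not_and] at h
        simpa using h q hq
      simp [h, pvScore, hnone]
  rw [hstepA, hcounts, hstepB, PySem.List.foldl_add, PySem.List.foldl_add,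
    PySem.Dict.items_counter, List.map_map]
  simp only [zero_add]
  rw [show ((fun (p : String × Int) => p.2 * pvScore sentiments p.1) ∘
      fun k => (k, ((((PySem.Str.split₀ text).map pvClean).count k : Int))))
      = fun k => (((PySem.Str.split₀ text).map pvClean).count k : Int) * pvScore sentiments k
      from rfl]
  rw [pv_weighted_sum (pvScore sentiments) ((PySem.Str.split₀ text).map pvClean), List.map_map]
  rfl

-- ===== VERDICT (by name: the statement is the Claim_ definition above) =====
theorem sentiment_scores_spec : Claim_equal_sentiment_scores := by
  intro sentiments texts _
  unfold Spec_sentiment_scores sentiment_scores sentiment_scores_alt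
  simp only [PySem.List.foldl_append_singleton_eq_map]
  apply List.map_congr_left
  intro text _
  exact pv_total_eq sentiments text
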